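-- pv_equiv track=rewrite | github.com/3IVIS/cuddlytoddly | cuddlytoddly/ui/dag_utils.py | ensure_path_starts_at_root
-- ===== SOURCE A (Python) =====
-- from collections import defaultdict, deque
--
-- def ensure_path_starts_at_root(dag, path):
--     """
--     Given a path (list of nodes), ensures it starts at a root node.
--     If the path doesn't start at a root, extends it from the beginning
--     until a root is found. The end of the path remains unchanged.
--
--     dag: dict[node_id] -> list of child node_ids
--     path: list of node_ids
--     """
--     if not path:
--         return path
--
--     # Build a reverse mapping: child -> list of parents
--     all_nodes = set(dag.keys())
--     all_children = {c for children in dag.values() for c in children}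
--     roots = all_nodes - all_children
--
--     # If the path already starts at a root, return as-is
--     if path[0] in roots:
--         return path
--
--     # Build parent map for reverse traversal
--     parent_map = {}
--     for node, children in dag.items():
--         for child in children:
--             parent_map.setdefault(child, []).append(node)
--
--     # Walk backwards from path[0] using BFS until we hit a root
--     def find_prefix_to_root(start_node):
--         # BFS to find shortest path from any root to start_node (in reverse)
--         queue = deque([[start_node]])
--         visited = {start_node}
--
--         while queue:
--             current_path = queue.popleft()
--             current_node = current_path[-1]
--
--             if current_node in roots:
--                 # Reverse since we built it backwards
--                 return list(reversed(current_path))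
--
--             for parent in parent_map.get(current_node, []):
--                 if parent not in visited:
--                     visited.add(parent)
--                     queue.append(current_path + [parent])
--
--         return None  # No root found (e.g. cyclic or disconnected)
--
--     prefix = find_prefix_to_root(path[0])
--
--     if prefix is None:
--         return path  # Can't extend, return original
--
--     # prefix ends with path[0], so drop the last element to avoid duplication
--     return prefix[:-1] + path
-- ===== SOURCE B (Python) =====
-- def ensure_path_starts_at_root(dag, path):
--     """
--     Same task, different algorithm: instead of a deque of full path copies with
--     an early exit, run ONE exhaustive backward BFS in which the discovery-order
--     list itself is the queue (scanned by index) and a predecessor map is kept;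
--     afterwards pick the first root in discovery order and rebuild the prefix.
--     """
--     if not path:
--         return path
--
--     start = path[0]
--     children = {c for cs in dag.values() for c in cs}
--
--     def is_root(n):
--         return n in dag and n not in children
--
--     if is_root(start):
--         return path
--
--     edges = [(c, node) for node, cs in dag.items() for c in cs]
--     parent_map = {}
--     for c, node in edges:
--         parent_map.setdefault(c, []).append(node)
--
--     # exhaustive backward BFS; 'order' doubles as the queue
--     order = [start]
--     visited = {start}
--     pred = {}
--     i = 0
--     while i < len(order):
--         n = order[i]
--         i += 1
--         for par in parent_map.get(n, []):
--             if par not in visited: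
--                 visited.add(par)
--                 pred[par] = n
--                 order.append(par)
--
--     found = next((x for x in order if is_root(x)), None)
--     if found is None:
--         return path
--
--     prefix = []
--     n = found
--     while n != start:
--         prefix.append(n)
--         n = pred[n]
--     return prefix + path
-- ===== Notes on version B (the rewrite author's own statement) =====
-- stated objective: alternative
-- what changed: A's BFS keeps a deque of full path copies and exits early at the first dequeued root; B runs one exhaustive backward BFS in which the discovery-order list itself serves as the queue (index scan) and a predecessor map is kept, then picks the first root in discovery order and reconstructs the prefix once, which gives the same node and chain because FIFO dequeue order equals discovery order.
import Mathlib
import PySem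

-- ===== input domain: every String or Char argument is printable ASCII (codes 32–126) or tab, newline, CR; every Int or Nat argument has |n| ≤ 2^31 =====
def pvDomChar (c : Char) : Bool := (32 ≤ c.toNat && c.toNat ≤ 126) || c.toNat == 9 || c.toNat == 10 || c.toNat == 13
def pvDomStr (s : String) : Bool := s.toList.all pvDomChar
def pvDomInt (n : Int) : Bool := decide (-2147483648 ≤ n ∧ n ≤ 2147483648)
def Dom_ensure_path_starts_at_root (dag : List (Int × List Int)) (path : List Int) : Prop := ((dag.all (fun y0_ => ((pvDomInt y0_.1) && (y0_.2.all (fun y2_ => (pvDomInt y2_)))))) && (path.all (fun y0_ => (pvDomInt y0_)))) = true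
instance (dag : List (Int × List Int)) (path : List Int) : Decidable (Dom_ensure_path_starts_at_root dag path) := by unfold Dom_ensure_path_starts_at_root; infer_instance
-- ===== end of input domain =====

-- B replaces A's early-exit BFS over full path copies by one exhaustive backward BFS whose
-- discovery-order list is the queue, with a predecessor map and a single final reconstruction;
-- FIFO dequeue order equals discovery order, so the same root and prefix result.

-- ===== PORT A =====
-- BFS over whole paths, exactly as A's find_prefix_to_root; fuel 1 + Σ|children lists| (set by
-- the caller) bounds the number of dequeues, so fuel never runs out on any input.
def pvBfsA (roots : PySem.Set Int) (pm : PySem.Dict Int (List Int)) :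
    Nat → List (List Int) → PySem.Set Int → Option (List Int)
  | 0, _, _ => none
  | _ + 1, [], _ => none
  | fuel + 1, p :: queue, visited =>
      -- current_node = current_path[-1]
      let cur := PySem.List.pyGetD p (-1) 0
      if PySem.Set.contains roots cur then some p.reverse
      else
        let st := (PySem.Dict.getD pm cur []).foldl
          (fun (s : List (List Int) × PySem.Set Int) par =>
            if PySem.Set.contains s.2 par then s
            else (s.1 ++ [p ++ [par]], PySem.Set.add s.2 par))
          (queue, visited)
        pvBfsA roots pm fuel st.1 st.2

def ensure_path_starts_at_root (dag : List (Int × List Int)) (path : List Int) : List Int :=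
  match path with
  | [] => path
  | p0 :: _ =>
    let d := PySem.Dict.ofList dag
    let allNodes := PySem.Set.ofList (PySem.Dict.keys d)
    let allChildren := (PySem.Dict.values d).foldl
      (fun s cs => cs.foldl PySem.Set.add s) PySem.Set.empty
    let roots := PySem.Set.diff allNodes allChildren
    if PySem.Set.contains roots p0 then path
    else
      let pm := (PySem.Dict.items d).foldl
        (fun pm nc => nc.2.foldl (fun pm c => PySem.Dict.modify pm c [] (· ++ [nc.1])) pm)
        PySem.Dict.empty
      let fuel := 1 + ((PySem.Dict.items d).map (fun nc => nc.2.length)).sum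
      match pvBfsA roots pm fuel [[p0]] (PySem.Set.add PySem.Set.empty p0) with
      | none => path
      | some prefx => PySem.List.slice prefx none (some (-1)) ++ path

-- ===== PORT B =====
-- prefix reconstruction: follow pred from the found root back to start (Source B's final while loop);
-- fuel pred.size + 1 bounds the chain length, the default in getD is never used on B's own maps.
def pvChainB (pred : PySem.Dict Int Int) (start : Int) : Nat → Int → List Int → List Int
  | 0, _, acc => acc
  | fuel + 1, n, acc =>
      if n = start then acc
      else pvChainB pred start fuel (PySem.Dict.getD pred n start) (acc ++ [n])

-- exhaustive backward BFS: python's 'order' list is done ++ todo (i the boundary); returns the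
-- final discovery order and the predecessor map; at fuel 0 the unscanned tail is dropped (fuel,
-- chosen ≥ total dequeues by the caller, never actually runs out).
def pvBfsB (pm : PySem.Dict Int (List Int)) :
    Nat → List Int → PySem.Set Int → PySem.Dict Int Int → List Int →
      List Int × PySem.Dict Int Int
  | 0, _, _, pred, done => (done, pred)
  | _ + 1, [], _, pred, done => (done, pred)
  | fuel + 1, n :: todo, vis, pred, done =>
      let st := (PySem.Dict.getD pm n []).foldl
        (fun (s : List Int × PySem.Set Int × PySem.Dict Int Int) par =>
          if PySem.Set.contains s.2.1 par then s
          else (s.1 ++ [par], PySem.Set.add s.2.1 par, PySem.Dict.insert s.2.2 par n))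
        (todo, vis, pred)
      pvBfsB pm fuel st.1 st.2.1 st.2.2 (done ++ [n])

def ensure_path_starts_at_root_alt (dag : List (Int × List Int)) (path : List Int) : List Int :=
  match path with
  | [] => path
  | p0 :: _ =>
    let d := PySem.Dict.ofList dag
    let childrenSet := (PySem.Dict.values d).foldl
      (fun s cs => cs.foldl PySem.Set.add s) PySem.Set.empty
    let isRoot : Int → Bool :=
      fun n => PySem.Dict.contains d n && !(PySem.Set.contains childrenSet n)
    if isRoot p0 then path
    else
      let edges := (PySem.Dict.items d).flatMap (fun nc => nc.2.map (fun c => (c, nc.1)))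
      let pm := edges.foldl
        (fun pm e => PySem.Dict.modify pm e.1 [] (· ++ [e.2])) PySem.Dict.empty
      let fuel := edges.length + 1
      let res := pvBfsB pm fuel [p0] (PySem.Set.add PySem.Set.empty p0) PySem.Dict.empty []
      match res.1.find? isRoot with
      | none => path
      | some found => pvChainB res.2 p0 (PySem.Dict.size res.2 + 1) found [] ++ path

-- ===== PRECONDITION & SPEC =====
def Spec_ensure_path_starts_at_root (dag : List (Int × List Int)) (path : List Int) (out : List Int) : Prop := out = ensure_path_starts_at_root_alt dag path
instance (dag : List (Int × List Int)) (path : List Int) (out : List Int) : Decidable (Spec_ensure_path_starts_at_root dag path out) := by unfold Spec_ensure_path_starts_at_root; infer_instance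

-- ===== CLAIM (what is proved, stated in full; the proofs are below) =====
def Claim_equal_ensure_path_starts_at_root : Prop := ∀ (dag : List (Int × List Int)) (path : List Int), Dom_ensure_path_starts_at_root dag path → Spec_ensure_path_starts_at_root dag path (ensure_path_starts_at_root dag path)

-- ===== LEMMAS AND PROOFS =====

-- "the pred-chain recorded in pred spells out the path p" (consecutive links of p are pred entries)
def pvLinks (pred : PySem.Dict Int Int) (p : List Int) : Prop :=
  List.IsChain (fun x y => PySem.Dict.get? pred y = some x) p

-- invariant tying one A-queue entry (a whole path) to one B-queue entry (its last node)
def pvGood (start : Int) (pred : PySem.Dict Int Int) (vis : PySem.Set Int)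
    (p : List Int) (n : Int) : Prop :=
  p ≠ [] ∧ p.head? = some start ∧ p.getLast? = some n ∧ pvLinks pred p ∧
    (∀ x ∈ p, x ∈ vis) ∧ p.Nodup

def pvGInv (vis : PySem.Set Int) (pred : PySem.Dict Int Int) : Prop :=
  (PySem.Dict.keys pred).Nodup ∧ ∀ k ∈ PySem.Dict.keys pred, k ∈ vis

-- A's result vs B's final (discovery order, pred map)
def pvRel (isRoot : Int → Bool) (start : Int)
    (ra : Option (List Int)) (rb : List Int × PySem.Dict Int Int) : Prop :=
  match ra with
  | none => rb.1.find? isRoot = none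
  | some L => ∃ nf, rb.1.find? isRoot = some nf ∧
      pvChainB rb.2 start (PySem.Dict.size rb.2 + 1) nf [] = L.dropLast

lemma pvLinks_tail_keys : ∀ (p : List Int) (pred : PySem.Dict Int Int), pvLinks pred p →
    ∀ y ∈ p.tail, y ∈ PySem.Dict.keys pred
  | [], _, _, _, hy => by simp at hy
  | [_], _, _, _, hy => by simp at hy
  | x :: y :: t, pred, h, z, hz => by
      rw [pvLinks, List.isChain_cons_cons] at h
      rcases List.mem_cons.mp hz with rfl | hz'
      · by_contra hk
        have h0 := (PySem.Dict.get?_eq_none_iff_not_mem_keys pred z).mpr hk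
        rw [h.1] at h0
        cases h0
      · exact pvLinks_tail_keys (y :: t) pred h.2 z hz'

lemma pvLinks_insert (pred : PySem.Dict Int Int) (par v : Int) :
    ∀ (p : List Int), (∀ y ∈ p, y ≠ par) → pvLinks pred p →
      pvLinks (PySem.Dict.insert pred par v) p
  | [], _, _ => List.isChain_nil
  | [a], _, _ => List.isChain_singleton a
  | x :: y :: t, hp, h => by
      rw [pvLinks, List.isChain_cons_cons] at h ⊢
      refine ⟨?_, pvLinks_insert pred par v (y :: t) (fun z hz => hp z (by simp [hz])) h.2⟩
      rw [PySem.Dict.get?_insert_of_ne pred v (hp y (by simp))]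
      exact h.1

-- reconstruction from the pred map retraces p backwards (without the leading start)
lemma pvChain_eq (start : Int) (pred : PySem.Dict Int Int) :
    ∀ (p : List Int) (n : Int) (fuel : Nat) (acc : List Int),
    p.head? = some start → p.getLast? = some n → pvLinks pred p → p.Nodup →
    p.length ≤ fuel + 1 →
    pvChainB pred start fuel n acc = acc ++ p.reverse.dropLast := by
  intro p
  induction p using List.reverseRecOn with
  | nil => intro n fuel acc h; simp at h
  | append_singleton q x ih =>
    intro n fuel acc hh hl hlinks hnd hlen
    have hnx : n = x := by simpa using hl.symm
    subst hnx
    rcases q with _ | ⟨a, t⟩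
    · -- p = [n], n = start
      have hstart : n = start := by simpa using hh
      cases fuel with
      | zero => simp [pvChainB]
      | succ f => simp [pvChainB, hstart]
    · -- p = (a :: t) ++ [n]
      have hq : (a :: t) ≠ ([] : List Int) := by simp
      have hhead : a = start := by simpa using hh
      have hnd' := List.nodup_append.mp hnd
      have hxq : n ∉ a :: t := fun hmem => hnd'.2.2 n hmem n (by simp) rfl
      have hne : n ≠ start := by
        intro he; exact hxq (by simp [he, ← hhead])
      rw [pvLinks, List.isChain_append] at hlinks
      have hlink : PySem.Dict.get? pred n = some ((a :: t).getLast hq) :=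
        hlinks.2.2 ((a :: t).getLast hq)
          (by rw [Option.mem_def]; exact List.getLast?_eq_some_getLast hq) n (by simp)
      cases fuel with
      | zero => simp at hlen
      | succ f =>
        rw [pvChainB]
        simp only [if_neg hne]
        rw [PySem.Dict.getD_of_get?_eq_some pred start hlink]
        have hih := ih ((a :: t).getLast hq) f (acc ++ [n]) (by simpa using hh)
          (List.getLast?_eq_some_getLast hq) hlinks.1 hnd'.1
          (by simp at hlen ⊢; omega)
        rw [hih]
        have hrev : ((a :: t) ++ [n]).reverse.dropLast = n :: (a :: t).reverse.dropLast := by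
          rw [List.reverse_append, List.reverse_singleton, List.singleton_append]
          exact List.dropLast_cons_of_ne_nil (by simp)
        rw [hrev]
        simp

lemma pvGood_mono (start : Int) (pred : PySem.Dict Int Int) (vis : PySem.Set Int)
    (par v : Int) (hpar : par ∉ vis) (p : List Int) (n : Int)
    (h : pvGood start pred vis p n) :
    pvGood start (PySem.Dict.insert pred par v) (PySem.Set.add vis par) p n := by
  obtain ⟨h1, h2, h3, h4, h5, h6⟩ := h
  refine ⟨h1, h2, h3, ?_, ?_, h6⟩
  · exact pvLinks_insert pred par v p (fun y hy he => hpar (he ▸ h5 y hy)) h4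
  · intro x hx; rw [PySem.Set.mem_add]; exact Or.inl (h5 x hx)

lemma pvGood_snoc (start nP : Int) (pred : PySem.Dict Int Int) (vis : PySem.Set Int)
    (p : List Int) (par : Int) (h : pvGood start pred vis p nP) (hpar : par ∉ vis) :
    pvGood start (PySem.Dict.insert pred par nP) (PySem.Set.add vis par) (p ++ [par]) par := by
  obtain ⟨h1, h2, h3, h4, h5, h6⟩ := h
  refine ⟨by simp, ?_, by simp, ?_, ?_, ?_⟩
  · rcases p with _ | ⟨a, t⟩
    · exact absurd rfl h1
    · simpa using h2
  · rw [pvLinks, List.isChain_append]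
    refine ⟨pvLinks_insert pred par nP p (fun y hy he => hpar (he ▸ h5 y hy)) h4,
      List.isChain_singleton par, ?_⟩
    intro y hy z hz
    rw [Option.mem_def, h3] at hy
    have hy' : y = nP := (Option.some_inj.mp hy).symm
    have hz' : z = par := Eq.symm (by simpa using hz)
    rw [hz', hy']
    exact PySem.Dict.get?_insert_self pred par nP
  · intro x hx
    rw [PySem.Set.mem_add]
    rcases List.mem_append.mp hx with hx | hx
    · exact Or.inl (h5 x hx)
    · exact Or.inr (by simpa using hx)
  · rw [List.nodup_append]
    refine ⟨h6, by simp, ?_⟩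
    intro x hx y hy he
    apply hpar
    have hxv := h5 x hx
    have hy' : y = par := by simpa using hy
    rwa [he, hy'] at hxv

lemma pvGInv_step (vis : PySem.Set Int) (pred : PySem.Dict Int Int) (par v : Int)
    (h : pvGInv vis pred) (hpar : par ∉ vis) :
    pvGInv (PySem.Set.add vis par) (PySem.Dict.insert pred par v) := by
  obtain ⟨h1, h2⟩ := h
  have hnc : PySem.Dict.contains pred par = false := by
    rw [← Bool.not_eq_true]
    rw [PySem.Dict.contains_iff_mem_keys]
    intro hk; exact hpar (h2 par hk)
  rw [pvGInv, PySem.Dict.keys_insert_of_not_contains pred v hnc]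
  constructor
  · rw [List.nodup_append]
    refine ⟨h1, by simp, ?_⟩
    intro x hx y hy he
    apply hpar
    have hxv := h2 x hx
    have hy' : y = par := by simpa using hy
    rwa [he, hy'] at hxv
  · intro k hk
    rw [PySem.Set.mem_add]
    rcases List.mem_append.mp hk with hk | hk
    · exact Or.inl (h2 k hk)
    · exact Or.inr (by simpa using hk)

-- B's per-node fold preserves any pvGood and the global invariant
lemma pvFoldB (start nP : Int) :
    ∀ (ps : List Int) (qB : List Int) (vis : PySem.Set Int) (pred : PySem.Dict Int Int)
      (p : List Int) (n : Int),
    pvGood start pred vis p n → pvGInv vis pred →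
    pvGood start
      ((ps.foldl (fun (s : List Int × PySem.Set Int × PySem.Dict Int Int) par =>
        if PySem.Set.contains s.2.1 par then s
        else (s.1 ++ [par], PySem.Set.add s.2.1 par, PySem.Dict.insert s.2.2 par nP))
        (qB, vis, pred)).2.2)
      ((ps.foldl (fun (s : List Int × PySem.Set Int × PySem.Dict Int Int) par =>
        if PySem.Set.contains s.2.1 par then s
        else (s.1 ++ [par], PySem.Set.add s.2.1 par, PySem.Dict.insert s.2.2 par nP))
        (qB, vis, pred)).2.1) p n ∧
    pvGInv
      ((ps.foldl (fun (s : List Int × PySem.Set Int × PySem.Dict Int Int) par =>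
        if PySem.Set.contains s.2.1 par then s
        else (s.1 ++ [par], PySem.Set.add s.2.1 par, PySem.Dict.insert s.2.2 par nP))
        (qB, vis, pred)).2.1)
      ((ps.foldl (fun (s : List Int × PySem.Set Int × PySem.Dict Int Int) par =>
        if PySem.Set.contains s.2.1 par then s
        else (s.1 ++ [par], PySem.Set.add s.2.1 par, PySem.Dict.insert s.2.2 par nP))
        (qB, vis, pred)).2.2)
  | [], _, _, _, _, _, hP, hG => ⟨hP, hG⟩
  | par :: ps, qB, vis, pred, p, n, hP, hG => by
      simp only [List.foldl_cons]
      by_cases hc : PySem.Set.contains vis par = true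
      · simp only [hc, if_true]
        exact pvFoldB start nP ps qB vis pred p n hP hG
      · simp only [hc, if_false, Bool.false_eq_true]
        have hpar : par ∉ vis := fun hm => hc ((PySem.Set.contains_iff vis par).mpr hm)
        exact pvFoldB start nP ps (qB ++ [par]) (PySem.Set.add vis par)
          (PySem.Dict.insert pred par nP) p n
          (pvGood_mono start pred vis par nP hpar p n hP)
          (pvGInv_step vis pred par nP hG hpar)

-- B's continuation only ever inserts fresh (unvisited) keys, so a pvGood survives to the end
lemma pvPresB (pm : PySem.Dict Int (List Int)) (start : Int) :
    ∀ (fuel : Nat) (todo : List Int) (vis : PySem.Set Int) (pred : PySem.Dict Int Int)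
      (done : List Int) (p : List Int) (n : Int),
    pvGood start pred vis p n → pvGInv vis pred →
    ∃ vis', pvGood start (pvBfsB pm fuel todo vis pred done).2 vis' p n ∧
      pvGInv vis' (pvBfsB pm fuel todo vis pred done).2
  | 0, _, vis, _, _, _, _, hP, hG => ⟨vis, hP, hG⟩
  | _ + 1, [], vis, _, _, _, _, hP, hG => ⟨vis, hP, hG⟩
  | fuel + 1, m :: todo, vis, pred, done, p, n, hP, hG => by
      rw [pvBfsB]
      obtain ⟨hP', hG'⟩ := pvFoldB start m (PySem.Dict.getD pm m []) todo vis pred p n hP hG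
      exact pvPresB pm start fuel _ _ _ (done ++ [m]) p n hP' hG'

-- the discovery-order accumulator only grows
lemma pvBfsB_done (pm : PySem.Dict Int (List Int)) :
    ∀ (fuel : Nat) (todo : List Int) (vis : PySem.Set Int) (pred : PySem.Dict Int Int)
      (done : List Int), ∃ t, (pvBfsB pm fuel todo vis pred done).1 = done ++ t
  | 0, _, _, _, done => ⟨[], by rw [pvBfsB]; simp⟩
  | _ + 1, [], _, _, done => ⟨[], by rw [pvBfsB]; simp⟩
  | fuel + 1, m :: todo, vis, pred, done => by
      rw [pvBfsB]
      obtain ⟨t, ht⟩ := pvBfsB_done pm fuel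
        (((PySem.Dict.getD pm m []).foldl
          (fun (s : List Int × PySem.Set Int × PySem.Dict Int Int) par =>
            if PySem.Set.contains s.2.1 par then s
            else (s.1 ++ [par], PySem.Set.add s.2.1 par, PySem.Dict.insert s.2.2 par m))
          (todo, vis, pred)).1) _ _ (done ++ [m])
      exact ⟨m :: t, by rw [ht]; simp⟩

-- matched folds: A appends extended paths, B appends nodes + pred entries, same visited set
lemma pvFold_step (start nP : Int) (p : List Int) :
    ∀ (ps : List Int) (qA : List (List Int)) (qB : List Int) (vis : PySem.Set Int)
      (pred : PySem.Dict Int Int),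
    List.Forall₂ (pvGood start pred vis) qA qB → pvGInv vis pred →
    pvGood start pred vis p nP →
    (ps.foldl (fun (s : List (List Int) × PySem.Set Int) par =>
        if PySem.Set.contains s.2 par then s
        else (s.1 ++ [p ++ [par]], PySem.Set.add s.2 par)) (qA, vis)).2 =
      (ps.foldl (fun (s : List Int × PySem.Set Int × PySem.Dict Int Int) par =>
        if PySem.Set.contains s.2.1 par then s
        else (s.1 ++ [par], PySem.Set.add s.2.1 par, PySem.Dict.insert s.2.2 par nP))
        (qB, vis, pred)).2.1 ∧
    List.Forall₂
      (pvGood start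
        ((ps.foldl (fun (s : List Int × PySem.Set Int × PySem.Dict Int Int) par =>
          if PySem.Set.contains s.2.1 par then s
          else (s.1 ++ [par], PySem.Set.add s.2.1 par, PySem.Dict.insert s.2.2 par nP))
          (qB, vis, pred)).2.2)
        ((ps.foldl (fun (s : List Int × PySem.Set Int × PySem.Dict Int Int) par =>
          if PySem.Set.contains s.2.1 par then s
          else (s.1 ++ [par], PySem.Set.add s.2.1 par, PySem.Dict.insert s.2.2 par nP))
          (qB, vis, pred)).2.1))
      ((ps.foldl (fun (s : List (List Int) × PySem.Set Int) par =>
        if PySem.Set.contains s.2 par then s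
        else (s.1 ++ [p ++ [par]], PySem.Set.add s.2 par)) (qA, vis)).1)
      ((ps.foldl (fun (s : List Int × PySem.Set Int × PySem.Dict Int Int) par =>
        if PySem.Set.contains s.2.1 par then s
        else (s.1 ++ [par], PySem.Set.add s.2.1 par, PySem.Dict.insert s.2.2 par nP))
        (qB, vis, pred)).1) ∧
    pvGInv
      ((ps.foldl (fun (s : List Int × PySem.Set Int × PySem.Dict Int Int) par =>
        if PySem.Set.contains s.2.1 par then s
        else (s.1 ++ [par], PySem.Set.add s.2.1 par, PySem.Dict.insert s.2.2 par nP))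
        (qB, vis, pred)).2.1)
      ((ps.foldl (fun (s : List Int × PySem.Set Int × PySem.Dict Int Int) par =>
        if PySem.Set.contains s.2.1 par then s
        else (s.1 ++ [par], PySem.Set.add s.2.1 par, PySem.Dict.insert s.2.2 par nP))
        (qB, vis, pred)).2.2)
  | [], qA, qB, vis, pred, hF, hG, _ => ⟨rfl, hF, hG⟩
  | par :: ps, qA, qB, vis, pred, hF, hG, hP => by
      simp only [List.foldl_cons]
      by_cases hc : PySem.Set.contains vis par = true
      · simp only [hc, if_true]
        exact pvFold_step start nP p ps qA qB vis pred hF hG hP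
      · simp only [hc, if_false, Bool.false_eq_true]
        have hpar : par ∉ vis := fun hm => hc ((PySem.Set.contains_iff vis par).mpr hm)
        exact pvFold_step start nP p ps (qA ++ [p ++ [par]]) (qB ++ [par])
          (PySem.Set.add vis par) (PySem.Dict.insert pred par nP)
          (List.rel_append
            (List.Forall₂.imp (fun a b h => pvGood_mono start pred vis par nP hpar a b h) hF)
            (List.Forall₂.cons (pvGood_snoc start nP pred vis p par hP hpar) List.Forall₂.nil))
          (pvGInv_step vis pred par nP hG hpar)
          (pvGood_mono start pred vis par nP hpar p nP hP)

lemma pvBfs_rel (roots : PySem.Set Int) (isRoot : Int → Bool) (pm : PySem.Dict Int (List Int))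
    (start : Int) (hr : ∀ n, PySem.Set.contains roots n = isRoot n) :
    ∀ (fuel : Nat) (qA : List (List Int)) (todo : List Int) (vis : PySem.Set Int)
      (pred : PySem.Dict Int Int) (done : List Int),
      List.Forall₂ (pvGood start pred vis) qA todo → pvGInv vis pred →
      done.find? isRoot = none →
      pvRel isRoot start (pvBfsA roots pm fuel qA vis) (pvBfsB pm fuel todo vis pred done) := by
  intro fuel
  induction fuel with
  | zero =>
    intro qA todo vis pred done _ _ hd
    rw [pvBfsA, pvBfsB, pvRel]
    exact hd
  | succ f ih =>
    intro qA todo vis pred done hF hG hd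
    cases hF with
    | nil =>
      rw [pvBfsA, pvBfsB, pvRel]
      exact hd
    | cons hGood hRest =>
      rename_i p n qA' todo'
      obtain ⟨h1, h2, h3, h4, h5, h6⟩ := hGood
      have hcur : PySem.List.pyGetD p (-1) 0 = n := by
        rw [PySem.List.pyGetD_neg_one p 0 h1]
        rw [List.getLast?_eq_some_getLast h1] at h3
        exact Option.some_inj.mp h3
      rw [pvBfsA, pvBfsB]
      simp only [hcur, hr n]
      by_cases hroot : isRoot n = true
      · simp only [hroot, if_true]
        rw [pvRel]
        -- B keeps going; the pred chain of p survives, and n is the first root discovered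
        obtain ⟨hP', hG'⟩ := pvFoldB start n (PySem.Dict.getD pm n []) todo' vis pred p n
          ⟨h1, h2, h3, h4, h5, h6⟩ hG
        obtain ⟨vis', hPf, hGf⟩ := pvPresB pm start f _ _ _ (done ++ [n]) p n hP' hG'
        obtain ⟨t, ht⟩ := pvBfsB_done pm f _ _ _ (done ++ [n])
        refine ⟨n, ?_, ?_⟩
        · rw [ht, List.append_assoc, List.find?_append, hd, Option.none_or,
            List.singleton_append, List.find?_cons_of_pos hroot]
        · obtain ⟨g1, g2, g3, g4, _, g6⟩ := hPf
          set pf := (pvBfsB pm f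
            (((PySem.Dict.getD pm n []).foldl
              (fun (s : List Int × PySem.Set Int × PySem.Dict Int Int) par =>
                if PySem.Set.contains s.2.1 par then s
                else (s.1 ++ [par], PySem.Set.add s.2.1 par, PySem.Dict.insert s.2.2 par n))
              (todo', vis, pred)).1) _ _ (done ++ [n])).2 with hpf
          have hsub : p.tail ⊆ PySem.Dict.keys pf :=
            fun y hy => pvLinks_tail_keys p pf g4 y hy
          have htail : p.tail.length ≤ (PySem.Dict.keys pf).length :=
            (List.subperm_of_subset (g6.sublist (List.tail_sublist p)) hsub).length_le
          have hlen : p.length ≤ (PySem.Dict.size pf + 1) + 1 := by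
            rcases p with _ | ⟨a, t'⟩
            · simp
            · have ht' : (a :: t').tail.length = t'.length := rfl
              have hsz : (PySem.Dict.keys pf).length = PySem.Dict.size pf := by
                simp [PySem.Dict.keys, PySem.Dict.size]
              rw [ht', hsz] at htail
              simp only [List.length_cons]
              omega
          have := pvChain_eq start pf p n (PySem.Dict.size pf + 1) [] g2 g3 g4 g6 hlen
          simpa using this
      · simp only [hroot, if_false, Bool.false_eq_true]
        obtain ⟨hvis, hF', hG'⟩ :=
          pvFold_step start n p (PySem.Dict.getD pm n []) qA' todo' vis pred hRest hG
            ⟨h1, h2, h3, h4, h5, h6⟩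
        rw [hvis]
        refine ih _ _ _ _ _ hF' hG' ?_
        rw [List.find?_append, hd, Option.none_or,
          List.find?_cons_of_neg (fun h => hroot h)]
        rfl

-- roots-set membership test of A agrees with B's two membership tests
lemma pvRoots_eq (d : PySem.Dict Int (List Int)) (ch : PySem.Set Int) (n : Int) :
    PySem.Set.contains (PySem.Set.diff (PySem.Set.ofList (PySem.Dict.keys d)) ch) n =
      (PySem.Dict.contains d n && !(PySem.Set.contains ch n)) := by
  rw [Bool.eq_iff_iff]
  rw [PySem.Set.contains_iff, PySem.Set.mem_diff]
  rw [← PySem.Set.contains_iff ch n]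
  rw [PySem.Set.mem_ofList, ← PySem.Dict.contains_iff_mem_keys]
  cases PySem.Dict.contains d n <;> cases PySem.Set.contains ch n <;> simp

-- A's fuel (items-length sum) equals B's fuel (edge-list length)
lemma pvFuel_eq (d : PySem.Dict Int (List Int)) :
    ((PySem.Dict.items d).flatMap (fun nc => nc.2.map (fun c => (c, nc.1)))).length + 1 =
      1 + ((PySem.Dict.items d).map (fun nc => nc.2.length)).sum := by
  rw [List.length_flatMap]
  simp
  omega

-- ===== VERDICT (by name: the statement is the Claim_ definition above) =====
theorem ensure_path_starts_at_root_spec : Claim_equal_ensure_path_starts_at_root := by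
  intro dag path _
  rw [Spec_ensure_path_starts_at_root]
  cases path with
  | nil => rfl
  | cons p0 rest =>
    simp only [ensure_path_starts_at_root, ensure_path_starts_at_root_alt]
    rw [pvRoots_eq]
    by_cases hroot :
        (PySem.Dict.contains (PySem.Dict.ofList dag) p0 &&
          !(PySem.Set.contains
            ((PySem.Dict.values (PySem.Dict.ofList dag)).foldl
              (fun s cs => cs.foldl PySem.Set.add s) PySem.Set.empty) p0)) = true
    · simp only [hroot, if_true]
    · simp only [hroot, if_false, Bool.false_eq_true]
      -- B's pm equals A's pm (fold over flattened edges = nested fold)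
      have hpm : ((PySem.Dict.items (PySem.Dict.ofList dag)).flatMap
            (fun nc => nc.2.map (fun c => (c, nc.1)))).foldl
          (fun pm e => PySem.Dict.modify pm e.1 [] (· ++ [e.2])) PySem.Dict.empty =
          (PySem.Dict.items (PySem.Dict.ofList dag)).foldl
            (fun pm nc => nc.2.foldl (fun pm c => PySem.Dict.modify pm c [] (· ++ [nc.1])) pm)
            PySem.Dict.empty := by
        rw [List.foldl_flatMap]
        congr 1
        funext pm nc
        rw [List.foldl_map]
      rw [hpm, pvFuel_eq]
      have hrel := pvBfs_rel
        (PySem.Set.diff (PySem.Set.ofList (PySem.Dict.keys (PySem.Dict.ofList dag)))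
          ((PySem.Dict.values (PySem.Dict.ofList dag)).foldl
            (fun s cs => cs.foldl PySem.Set.add s) PySem.Set.empty))
        (fun n => PySem.Dict.contains (PySem.Dict.ofList dag) n &&
          !(PySem.Set.contains
            ((PySem.Dict.values (PySem.Dict.ofList dag)).foldl
              (fun s cs => cs.foldl PySem.Set.add s) PySem.Set.empty) n))
        ((PySem.Dict.items (PySem.Dict.ofList dag)).foldl
          (fun pm nc => nc.2.foldl (fun pm c => PySem.Dict.modify pm c [] (· ++ [nc.1])) pm)
          PySem.Dict.empty)
        p0 (fun n => pvRoots_eq _ _ n)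
        (1 + ((PySem.Dict.items (PySem.Dict.ofList dag)).map (fun nc => nc.2.length)).sum)
        [[p0]] [p0] (PySem.Set.add PySem.Set.empty p0) PySem.Dict.empty []
        (List.Forall₂.cons
          ⟨by simp, rfl, rfl, List.isChain_singleton p0,
            by intro x hx; rw [PySem.Set.mem_add]; simp at hx; simp [hx], by simp⟩
          List.Forall₂.nil)
        ⟨by simp [PySem.Dict.keys, PySem.Dict.empty], by simp [PySem.Dict.keys, PySem.Dict.empty]⟩
        rfl
      rcases hA : pvBfsA
          (PySem.Set.diff (PySem.Set.ofList (PySem.Dict.keys (PySem.Dict.ofList dag)))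
            ((PySem.Dict.values (PySem.Dict.ofList dag)).foldl
              (fun s cs => cs.foldl PySem.Set.add s) PySem.Set.empty))
          ((PySem.Dict.items (PySem.Dict.ofList dag)).foldl
            (fun pm nc => nc.2.foldl (fun pm c => PySem.Dict.modify pm c [] (· ++ [nc.1])) pm)
            PySem.Dict.empty)
          (1 + ((PySem.Dict.items (PySem.Dict.ofList dag)).map (fun nc => nc.2.length)).sum)
          [[p0]] (PySem.Set.add PySem.Set.empty p0) with _ | L
      · rw [hA] at hrel
        simp only [pvRel] at hrel
        rw [hrel]
      · rw [hA] at hrel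
        simp only [pvRel] at hrel
        obtain ⟨nf, hfind, hchain⟩ := hrel
        rw [hfind]
        simp only [hchain, PySem.List.slice_to_neg_one]
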